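-- pv_equiv track=rewrite | github.com/BOTX2000/addition | addition/data/perevod.py | perevod1
-- ===== SOURCE A (Python) =====
-- def perevod1 (text):
--     chi=["1", "2", "3", "4", "5", "6", "7", "8", "9", "0"]
--     a=0
--     for i in chi:
--         text=text.replace(chi[a], "#")
--         a=a+1
--     text=text.split("#")
--     dii= [x for x in text if x !='']
--     return dii
-- ===== SOURCE B (Python) =====
-- def perevod1(text):
--     res = []
--     buf = ""
--     for c in text:
--         if c in "0123456789#":
--             if buf:
--                 res.append(buf)
--                 buf = ""
--         else:
--             buf += c
--     if buf:
--         res.append(buf)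
--     return res
-- ===== Notes on version B (the rewrite author's own statement) =====
-- stated objective: alternative
-- what changed: Replaced ten full-string replace passes plus a split plus a filter by a single left-to-right scan that accumulates maximal runs of non-separator (non-digit, non-'#') characters.
import Mathlib
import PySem

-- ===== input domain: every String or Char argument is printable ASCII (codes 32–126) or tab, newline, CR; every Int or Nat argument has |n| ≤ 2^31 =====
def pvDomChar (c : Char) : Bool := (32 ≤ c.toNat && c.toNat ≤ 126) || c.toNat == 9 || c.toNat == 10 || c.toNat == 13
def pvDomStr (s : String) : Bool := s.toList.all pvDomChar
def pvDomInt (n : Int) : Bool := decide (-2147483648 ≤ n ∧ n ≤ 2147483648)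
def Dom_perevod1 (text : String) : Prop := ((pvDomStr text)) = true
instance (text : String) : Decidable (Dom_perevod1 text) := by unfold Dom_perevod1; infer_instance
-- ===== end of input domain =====

-- B replaces A's ten replace passes + split + filter by one character scan collecting maximal non-separator runs (alternative single-pass decomposition).


-- ===== PORT A =====
def perevod1 (text : String) : List String :=
  let chi : List String := ["1", "2", "3", "4", "5", "6", "7", "8", "9", "0"]
  let text := chi.foldl (fun t d => PySem.Str.replace t d "#") text
  match PySem.Str.split? text "#" with
  | some parts => parts.filter (fun x => x ≠ "")
  | none => []   -- unreachable: the separator "#" is non-empty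

-- ===== PORT B =====
-- c in "0123456789#"
def pvIsSep (c : Char) : Bool := "0123456789#".toList.contains c

def perevod1_alt (text : String) : List String :=
  let st := text.toList.foldl
    (fun (st : List String × String) c =>
      if pvIsSep c then (if st.2 ≠ "" then (st.1 ++ [st.2], "") else st)
      else (st.1, st.2.push c)) ([], "")
  if st.2 ≠ "" then st.1 ++ [st.2] else st.1

-- ===== PRECONDITION & SPEC =====
def Spec_perevod1 (text : String) (out : List String) : Prop := out = perevod1_alt text
instance (text : String) (out : List String) : Decidable (Spec_perevod1 text out) := by unfold Spec_perevod1; infer_instance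

-- ===== CLAIM (what is proved, stated in full; the proofs are below) =====
def Claim_equal_perevod1 : Prop := ∀ (text : String), Dom_perevod1 text → Spec_perevod1 text (perevod1 text)

-- ===== LEMMAS AND PROOFS =====

-- the digit→'#' replacement as one character map
def pvG (c : Char) : Char := if pvIsSep c then '#' else c

-- the common spec: the maximal non-separator runs, `buf` being the run in progress
def pvSegs (buf : List Char) : List Char → List (List Char)
  | [] => if buf = [] then [] else [buf]
  | c :: t => if pvIsSep c then (if buf = [] then pvSegs [] t else buf :: pvSegs [] t)
              else pvSegs (buf ++ [c]) t

-- split on '#' without the reversed accumulators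
def pvRaw (buf : List Char) : List Char → List (List Char)
  | [] => [buf]
  | c :: t => if c = '#' then buf :: pvRaw [] t else pvRaw (buf ++ [c]) t

-- replacing a single character is a map
theorem replace_go_single (d : Char) :
    ∀ (fuel : Nat) (l acc : List Char), l.length ≤ fuel →
      PySem.Chars.replace.go [d] ['#'] fuel l acc
        = acc.reverse ++ l.map (fun c => if c = d then '#' else c) := by
  intro fuel
  induction fuel with
  | zero =>
    intro l acc h
    have : l = [] := List.eq_nil_of_length_eq_zero (Nat.le_zero.mp h)
    subst this
    simp [PySem.Chars.replace.go]
  | succ n ih =>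
    intro l acc h
    cases l with
    | nil => simp [PySem.Chars.replace.go]
    | cons c t =>
      have hlen : t.length ≤ n := by simpa using h
      by_cases hc : c = d
      · subst hc
        simp [PySem.Chars.replace.go, List.isPrefixOf, ih _ _ hlen]
      · simp [PySem.Chars.replace.go, List.isPrefixOf, hc, Ne.symm hc, ih _ _ hlen]

theorem replace_single (s : List Char) (d : Char) :
    PySem.Chars.replace s [d] ['#'] = s.map (fun c => if c = d then '#' else c) := by
  rw [show PySem.Chars.replace s [d] ['#'] = PySem.Chars.replace.go [d] ['#'] s.length s [] from rfl]
  simpa using replace_go_single d s.length s [] le_rfl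

-- replacing one single-character string, on .toList
theorem toList_replace_single (s : String) (d : Char) :
    (PySem.Str.replace s (String.ofList [d]) "#").toList
      = s.toList.map (fun c => if c = d then '#' else c) := by
  rw [PySem.Str.toList_replace]
  simpa using replace_single s.toList d

-- a fold of single-character replaces is one map
theorem foldl_replaces (ds : List Char) (s : String) :
    ((ds.map (fun d => String.ofList [d])).foldl (fun t d => PySem.Str.replace t d "#") s).toList
      = s.toList.map (fun c => if ds.contains c then '#' else c) := by
  induction ds generalizing s with
  | nil => simp
  | cons d ds ih =>
    simp only [List.map_cons, List.foldl_cons]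
    rw [ih, toList_replace_single, List.map_map]
    apply List.map_congr_left
    intro c _
    simp only [Function.comp, List.contains_cons]
    by_cases hc : c = d
    · subst hc; simp
    · simp [hc]

-- the ten replaces of A compose to the map of pvG
theorem after_replaces (text : String) :
    ((["1", "2", "3", "4", "5", "6", "7", "8", "9", "0"] : List String).foldl
        (fun t d => PySem.Str.replace t d "#") text).toList
      = text.toList.map pvG := by
  rw [show (["1", "2", "3", "4", "5", "6", "7", "8", "9", "0"] : List String)
      = (['1', '2', '3', '4', '5', '6', '7', '8', '9', '0'].map (fun d => String.ofList [d])) from rfl]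
  rw [foldl_replaces]
  apply List.map_congr_left
  intro c _
  by_cases hs : pvIsSep c = true
  · have h2 : c = '0' ∨ c = '1' ∨ c = '2' ∨ c = '3' ∨ c = '4' ∨ c = '5' ∨ c = '6' ∨ c = '7'
        ∨ c = '8' ∨ c = '9' ∨ c = '#' := by
      simpa [pvIsSep,
        show "0123456789#".toList = ['0','1','2','3','4','5','6','7','8','9','#'] from rfl] using hs
    simp only [pvG, hs, if_true]
    rcases h2 with h|h|h|h|h|h|h|h|h|h|h <;> subst h <;> decide
  · have h2 : ¬ (c = '0' ∨ c = '1' ∨ c = '2' ∨ c = '3' ∨ c = '4' ∨ c = '5' ∨ c = '6' ∨ c = '7'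
        ∨ c = '8' ∨ c = '9' ∨ c = '#') := by
      simpa [pvIsSep,
        show "0123456789#".toList = ['0','1','2','3','4','5','6','7','8','9','#'] from rfl] using hs
    push Not at h2
    obtain ⟨h0, h1', h2', h3, h4, h5, h6, h7, h8, h9, hh⟩ := h2
    have hb : pvIsSep c = false := by simpa using hs
    simp [pvG, hb, h0, h1', h2', h3, h4, h5, h6, h7, h8, h9]

-- splitOn '#' without accumulators
theorem splitOn_go_hash :
    ∀ (fuel : Nat) (l cur : List Char) (acc : List (List Char)), l.length < fuel →
      PySem.Chars.splitOn.go ['#'] fuel l cur acc = acc.reverse ++ pvRaw cur.reverse l := by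
  intro fuel
  induction fuel with
  | zero => intro l cur acc h; omega
  | succ n ih =>
    intro l cur acc h
    cases l with
    | nil => simp [PySem.Chars.splitOn.go, pvRaw]
    | cons c t =>
      have hlen : t.length < n := by simpa using h
      by_cases hc : c = '#'
      · subst hc
        simp [PySem.Chars.splitOn.go, List.isPrefixOf, ih _ _ _ hlen, pvRaw]
      · simp [PySem.Chars.splitOn.go, List.isPrefixOf, hc, Ne.symm hc, ih _ _ _ hlen, pvRaw]

theorem splitOn_hash (l : List Char) :
    PySem.Chars.splitOn l ['#'] = pvRaw [] l := by
  simpa [PySem.Chars.splitOn] using splitOn_go_hash (l.length + 1) l [] [] (by omega)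

-- filtering the raw split of the mapped string gives the runs
theorem filter_raw_map :
    ∀ (l buf : List Char),
      (pvRaw buf (l.map pvG)).filter (fun x => x ≠ []) = pvSegs buf l := by
  intro l
  induction l with
  | nil =>
    intro buf
    by_cases hb : buf = [] <;> simp [pvRaw, pvSegs, hb, List.filter]
  | cons c t ih =>
    intro buf
    by_cases hs : pvIsSep c
    · have hg : pvG c = '#' := by simp [pvG, hs]
      have h1 : (pvRaw buf ((c :: t).map pvG)).filter (fun x => x ≠ [])
          = (if buf = [] then [] else [buf])
            ++ (pvRaw [] (t.map pvG)).filter (fun x => x ≠ []) := by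
        by_cases hb : buf = [] <;> simp [pvRaw, hg, hb]
      rw [h1, ih]
      by_cases hb : buf = [] <;> simp [pvSegs, hs, hb]
    · have hg : pvG c = c := by simp [pvG, hs]
      have hne : c ≠ '#' := by
        intro e; subst e; simp [pvIsSep] at hs
      have h1 : pvRaw buf ((c :: t).map pvG) = pvRaw (buf ++ [c]) (t.map pvG) := by
        simp [pvRaw, hg, hne]
      rw [h1, ih]
      simp [pvSegs, hs]

-- B's scan computes the runs
theorem scan_eq :
    ∀ (l : List Char) (res : List String) (buf : List Char),
      (let st := l.foldl
        (fun (st : List String × String) c =>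
          if pvIsSep c then (if st.2 ≠ "" then (st.1 ++ [st.2], "") else st)
          else (st.1, st.2.push c)) (res, String.ofList buf);
       if st.2 ≠ "" then st.1 ++ [st.2] else st.1)
      = res ++ (pvSegs buf l).map String.ofList := by
  intro l
  have hne : ∀ buf : List Char, (String.ofList buf ≠ "") ↔ buf ≠ [] := by
    intro buf; rw [ne_eq, ← String.toList_inj]; simp
  have hpush : ∀ (buf : List Char) (c : Char),
      (String.ofList buf).push c = String.ofList (buf ++ [c]) := by
    intro buf c; rw [← String.toList_inj]; simp
  induction l with
  | nil =>
    intro res buf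
    by_cases hb : buf = []
    · subst hb; simp [pvSegs]
    · simp [pvSegs, hb, (hne buf).mpr hb]
  | cons c t ih =>
    intro res buf
    by_cases hs : pvIsSep c
    · by_cases hb : buf = []
      · subst hb
        simpa [hs, pvSegs] using ih res []
      · have h1 : (String.ofList buf ≠ "") = True := by simp [(hne buf).mpr hb]
        simp only [List.foldl_cons, hs, h1, if_pos trivial, ne_eq]
        simpa [pvSegs, hs, hb] using ih (res ++ [String.ofList buf]) []
    · simp only [List.foldl_cons, hs, if_false, Bool.false_eq_true, hpush]
      simpa [pvSegs, hs] using ih res (buf ++ [c])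

theorem perevod1_alt_eq (text : String) :
    perevod1_alt text = (pvSegs [] text.toList).map String.ofList := by
  have := scan_eq text.toList [] []
  simpa [perevod1_alt] using this

theorem perevod1_eq (text : String) :
    perevod1 text = (pvSegs [] text.toList).map String.ofList := by
  have hofne : ∀ cs : List Char, (String.ofList cs ≠ "") ↔ cs ≠ [] := by
    intro cs; rw [ne_eq, ← String.toList_inj]; simp
  show (match PySem.Str.split?
      ((["1", "2", "3", "4", "5", "6", "7", "8", "9", "0"] : List String).foldl
        (fun t d => PySem.Str.replace t d "#") text) "#" with
    | some parts => parts.filter (fun x => x ≠ "")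
    | none => []) = (pvSegs [] text.toList).map String.ofList
  rw [show (PySem.Str.split? ((["1", "2", "3", "4", "5", "6", "7", "8", "9", "0"] : List String).foldl
        (fun t d => PySem.Str.replace t d "#") text) "#")
      = some ((PySem.Chars.splitOn
          (((["1", "2", "3", "4", "5", "6", "7", "8", "9", "0"] : List String).foldl
            (fun t d => PySem.Str.replace t d "#") text).toList) ['#']).map String.ofList) from by
    simp [PySem.Str.split?, PySem.Chars.split?, show "#".toList = ['#'] from rfl]]
  rw [after_replaces, splitOn_hash]
  show (List.filter (fun x => x ≠ "") (List.map String.ofList (pvRaw [] (text.toList.map pvG))))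
      = (pvSegs [] text.toList).map String.ofList
  rw [List.filter_map]
  rw [← filter_raw_map text.toList []]
  congr 1
  apply List.filter_congr
  intro cs _
  simp [Function.comp, hofne cs]

-- ===== VERDICT (by name: the statement is the Claim_ definition above) =====
theorem perevod1_spec : Claim_equal_perevod1 := by
  intro text _
  unfold Spec_perevod1
  rw [perevod1_eq, perevod1_alt_eq]
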